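-- pv_equiv track=rewrite | github.com/mrliangcb/pri_lcb | my_app/web/test.py | chaibao
-- ===== SOURCE A (Python) =====
-- def chaibao(x):
--     maodian = []
--     for i, j in enumerate(x):
--         maodian.append(len(j))
--     y = ''.join(x) #str
--
--     for i in range(1, len(maodian)):
--         maodian[i] += maodian[i - 1]
--
--     return y,maodian
-- ===== SOURCE B (Python) =====
-- def chaibao(x):
--     # Divide and conquer: split the list in half, solve each half independently,
--     # then concatenate the texts and shift the right half's offsets by the left
--     # half's total length (the last left offset).
--     if not x:
--         return '', []
--     if len(x) == 1:
--         s = x[0]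
--         return s, [len(s)]
--     mid = len(x) // 2
--     yl, ml = chaibao(x[:mid])
--     yr, mr = chaibao(x[mid:])
--     off = ml[-1]
--     return yl + yr, ml + [off + v for v in mr]
-- ===== Notes on version B (the rewrite author's own statement) =====
-- stated objective: alternative
-- what changed: B is a divide-and-conquer recursion: it splits the list in half, solves each half independently, then concatenates the texts and shifts the right half's offsets by the left half's last offset, instead of A's iterative two passes (collect raw lengths, then rescan in place forming prefix sums).
import Mathlib
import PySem

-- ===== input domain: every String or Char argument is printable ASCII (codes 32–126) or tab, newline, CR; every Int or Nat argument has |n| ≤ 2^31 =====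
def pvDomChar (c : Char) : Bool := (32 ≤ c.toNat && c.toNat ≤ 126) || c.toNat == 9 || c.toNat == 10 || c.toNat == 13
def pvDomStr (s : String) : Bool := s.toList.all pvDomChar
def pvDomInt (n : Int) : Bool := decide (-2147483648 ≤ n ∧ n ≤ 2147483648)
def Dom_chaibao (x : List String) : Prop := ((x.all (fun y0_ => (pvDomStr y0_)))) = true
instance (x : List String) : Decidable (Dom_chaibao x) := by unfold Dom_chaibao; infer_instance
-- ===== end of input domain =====

-- B is a divide-and-conquer recursion: split the list in half, solve each half, then
-- concatenate the texts and shift the right half's offsets — instead of A's iterative two-pass loop.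

-- ===== PORT A =====
-- in-place update loop body: maodian[i] += maodian[i-1]
def chaibaoStep (m : List Int) (i : Int) : List Int :=
  PySem.List.pySetD m i (PySem.List.pyGetD m i 0 + PySem.List.pyGetD m (i - 1) 0)

def chaibao (x : List String) : String × List Int :=
  let maodian : List Int := x.foldl (fun acc j => acc ++ [(PySem.Str.len j : Int)]) []
  let y := PySem.Str.join "" x
  let maodian := (PySem.List.pyRange 1 (maodian.length : Int) 1).foldl chaibaoStep maodian
  (y, maodian)

-- ===== PORT B =====
def chaibao_alt (x : List String) : String × List Int :=
  match x with
  | [] => ("", [])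
  | [s] => (s, [(PySem.Str.len s : Int)])
  | a :: b :: t =>
    -- mid = len(x) // 2: both operands nonnegative, so Python floor division is Nat division (exact)
    let mid : Nat := (a :: b :: t).length / 2
    let l := chaibao_alt (PySem.List.slice (a :: b :: t) none (some (mid : Int)))
    let r := chaibao_alt (PySem.List.slice (a :: b :: t) (some (mid : Int)) none)
    let off := PySem.List.pyGetD l.2 (-1) 0
    -- 'yl + yr': Python string concatenation, exact as concatenation of the char lists
    (String.ofList (l.1.toList ++ r.1.toList), l.2 ++ r.2.map (fun v => off + v))
termination_by x.length
decreasing_by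
  · rw [PySem.List.slice_to_natCast]; simp only [List.length_take, List.length_cons]; omega
  · rw [PySem.List.slice_from_natCast]; simp only [List.length_drop, List.length_cons]; omega

-- ===== PRECONDITION & SPEC =====
def Spec_chaibao (x : List String) (out : String × List Int) : Prop := out = chaibao_alt x
instance (x : List String) (out : String × List Int) : Decidable (Spec_chaibao x out) := by unfold Spec_chaibao; infer_instance

-- ===== CLAIM =====
def Claim_equal_chaibao : Prop := ∀ (x : List String), Dom_chaibao x → Spec_chaibao x (chaibao x)

-- ===== LEMMAS AND PROOFS =====

-- running prefix sums of ls starting from total t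
def pvScan (t : Int) : List Int → List Int
  | [] => []
  | a :: ls => (t + a) :: pvScan (t + a) ls

theorem pvScan_shift (c t : Int) (ls : List Int) :
    (pvScan t ls).map (fun v => c + v) = pvScan (c + t) ls := by
  induction ls generalizing t with
  | nil => simp [pvScan]
  | cons a ls ih =>
    simp only [pvScan, List.map_cons, ih]
    rw [add_assoc]

theorem pvJoinNil_cons (p : List Char) (rest : List (List Char)) :
    PySem.Chars.join [] (p :: rest) = p ++ PySem.Chars.join [] rest := by
  cases rest with
  | nil => simp [PySem.Chars.join, List.intercalate]
  | cons q r => rw [PySem.Chars.join_cons_cons]; simp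

theorem pvJoinNil_eq_flatten (ps : List (List Char)) :
    PySem.Chars.join [] ps = ps.flatten := by
  induction ps with
  | nil => simp [PySem.Chars.join, List.intercalate]
  | cons p ps ih => rw [pvJoinNil_cons, ih, List.flatten_cons]

theorem pvScan_append (t : Int) (ls ms : List Int) :
    pvScan t (ls ++ ms) = pvScan t ls ++ pvScan (t + ls.sum) ms := by
  induction ls generalizing t with
  | nil => simp [pvScan]
  | cons a ls ih =>
    simp only [List.cons_append, pvScan, ih, List.sum_cons]
    rw [add_assoc]

theorem pvScan_ne_nil (t : Int) (ls : List Int) (h : ls ≠ []) : pvScan t ls ≠ [] := by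
  cases ls with
  | nil => exact absurd rfl h
  | cons a ms => simp [pvScan]

theorem pvScan_last? (ls : List Int) : ∀ (t : Int), ls ≠ [] →
    (pvScan t ls).getLast? = some (t + ls.sum) := by
  induction ls with
  | nil => intro t h; exact absurd rfl h
  | cons a ls ih =>
    intro t _
    cases ls with
    | nil => simp [pvScan]
    | cons b ms =>
      have ih' := ih (t + a) (by simp)
      simp only [pvScan] at ih' ⊢
      rw [List.getLast?_cons_cons, ih']
      simp [List.sum_cons]; ring_nf

theorem pvScan_getLast (t : Int) (ls : List Int) (h : ls ≠ []) :
    PySem.List.pyGetD (pvScan t ls) (-1) 0 = t + ls.sum := by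
  have hne := pvScan_ne_nil t ls h
  rw [PySem.List.pyGetD_neg_one _ _ hne]
  have h1 := List.getLast?_eq_some_getLast (l := pvScan t ls) hne
  rw [pvScan_last? ls t h] at h1
  exact (Option.some.inj h1).symm

theorem pvAltEq (x : List String) :
    chaibao_alt x = (PySem.Str.join "" x, pvScan 0 (x.map fun s => (PySem.Str.len s : Int))) := by
  induction hn : x.length using Nat.strong_induction_on generalizing x with
  | _ n ih =>
    match x with
    | [] =>
      simp [chaibao_alt, pvScan, PySem.Str.join, PySem.Chars.join, List.intercalate]
    | [s] =>
      apply Prod.ext_iff.mpr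
      constructor
      · apply String.toList_injective
        simp [chaibao_alt, PySem.Str.toList_join]
      · simp [chaibao_alt, pvScan]
    | a :: b :: t =>
      rw [chaibao_alt]
      have hlen : (a :: b :: t).length = n := hn
      set xs := a :: b :: t with hxs
      have hmid1 : 1 ≤ xs.length / 2 := by simp only [hxs, List.length_cons]; omega
      have hmidlt : xs.length / 2 < xs.length := by simp only [hxs, List.length_cons]; omega
      rw [PySem.List.slice_to_natCast, PySem.List.slice_from_natCast]
      have hTake : (xs.take (xs.length / 2)).length < n := by
        rw [← hlen]; simp; omega
      have hDrop : (xs.drop (xs.length / 2)).length < n := by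
        rw [← hlen]; simp [hxs]; omega
      rw [ih _ hTake _ rfl, ih _ hDrop _ rfl]
      have hTakeNe : (xs.take (xs.length / 2)).map (fun s => (PySem.Str.len s : Int)) ≠ [] := by
        simp; omega
      apply Prod.ext_iff.mpr
      constructor
      · apply String.toList_injective
        simp only [PySem.Str.toList_join, String.toList_ofList,
          show ("".toList : List Char) = [] from rfl, pvJoinNil_eq_flatten]
        rw [← List.flatten_append, ← List.map_append, List.take_append_drop]
      · rw [pvScan_getLast 0 _ hTakeNe, pvScan_shift, add_zero, ← pvScan_append,
          ← List.map_append, List.take_append_drop]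

theorem pvFoldLen (x : List String) (acc : List Int) :
    x.foldl (fun acc j => acc ++ [(PySem.Str.len j : Int)]) acc
      = acc ++ x.map (fun s => (PySem.Str.len s : Int)) := by
  induction x generalizing acc with
  | nil => simp
  | cons s x ih =>
    rw [List.foldl_cons, ih]
    simp

theorem pvFoldA (ls q : List Int) (t : Int) :
    (PySem.List.pyRange ((q.length : Int) + 1) ((q.length : Int) + 1 + ls.length) 1).foldl
        chaibaoStep ((q ++ [t]) ++ ls)
      = (q ++ [t]) ++ pvScan t ls := by
  induction ls generalizing q t with
  | nil =>
    rw [PySem.List.pyRange_one_eq_nil (by simp)]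
    simp [pvScan]
  | cons a ls ih =>
    have hlt : (q.length : Int) + 1 < (q.length : Int) + 1 + (a :: ls).length := by
      simp
    rw [PySem.List.pyRange_one_cons hlt, List.foldl_cons]
    have hstep : chaibaoStep ((q ++ [t]) ++ a :: ls) ((q.length : Int) + 1)
        = ((q ++ [t]) ++ [t + a]) ++ ls := by
      unfold chaibaoStep
      have h1 : ((q.length : Int) + 1) = ((q.length + 1 : Nat) : Int) := by omega
      rw [h1]
      have hg1 : PySem.List.pyGetD ((q ++ [t]) ++ a :: ls) ((q.length + 1 : Nat) : Int) 0 = a := by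
        rw [PySem.List.pyGetD_natCast]
        rw [List.getD_eq_getElem?_getD, List.getElem?_append_right (by simp)]
        simp
      have hg2 : PySem.List.pyGetD ((q ++ [t]) ++ a :: ls) (((q.length + 1 : Nat) : Int) - 1) 0 = t := by
        have : (((q.length + 1 : Nat) : Int) - 1) = ((q.length : Nat) : Int) := by omega
        rw [this, PySem.List.pyGetD_natCast]
        rw [List.getD_eq_getElem?_getD, List.getElem?_append_left (by simp)]
        simp
      rw [hg1, hg2, PySem.List.pySetD_natCast]
      have : ((q ++ [t]) ++ a :: ls).set (q.length + 1) (a + t)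
          = (q ++ [t]) ++ (a + t) :: ls := by
        simp
      rw [this]
      simp [Int.add_comm a t]
    rw [hstep]
    have hq' : ((((q ++ [t]).length : Int)) + 1) = (q.length : Int) + 1 + 1 := by simp
    have := ih (q ++ [t]) (t + a)
    rw [hq'] at this
    have hrange : PySem.List.pyRange ((q.length : Int) + 1 + 1)
          ((q.length : Int) + 1 + ((a :: ls).length : Int)) 1
        = PySem.List.pyRange ((q.length : Int) + 1 + 1) ((q.length : Int) + 1 + 1 + (ls.length : Int)) 1 := by
      congr 1
      simp; ring
    rw [hrange, this]
    simp [pvScan]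

-- ===== VERDICT =====
theorem chaibao_spec : Claim_equal_chaibao := by
  intro x _
  unfold Spec_chaibao chaibao
  rw [pvAltEq]
  simp only [pvFoldLen, List.nil_append]
  congr 1
  cases hx : x.map (fun s => (PySem.Str.len s : Int)) with
  | nil => simp [PySem.List.pyRange_one_eq_nil, pvScan]
  | cons a ls =>
    have := pvFoldA ls [] a
    simp only [List.length_nil, Nat.cast_zero, List.nil_append, zero_add] at this
    have hlen : ((a :: ls).length : Int) = 1 + (ls.length : Int) := by simp; ring
    rw [hlen]
    simpa [pvScan] using this
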